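-- pv_equiv track=rewrite | github.com/vtarsh/code-rag-mcp | scripts/build_index.py | _parse_cql_values
-- ===== SOURCE A (Python) =====
-- def _parse_cql_values(values_str: str) -> list[str]:
--     """Parse CQL VALUES clause, handling nested [] and {} structures."""
--     values: list[str] = []
--     current = ""
--     depth = 0
--
--     for char in values_str:
--         if char in ("[", "{"):
--             depth += 1
--             current += char
--         elif char in ("]", "}"):
--             depth -= 1
--             current += char
--         elif char == "," and depth == 0:
--             values.append(current.strip())
--             current = ""
--         elif char == "'" and depth == 0:
--             current += char
--         else:
--             current += char
--
--     if current.strip():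
--         values.append(current.strip())
--
--     return values
-- ===== SOURCE B (Python) =====
-- def _split_first(s):
--     """Return (before, after) around the first top-level comma, else None."""
--     depth = 0
--     for i, ch in enumerate(s):
--         if ch in "[{":
--             depth += 1
--         elif ch in "]}":
--             depth -= 1
--         elif ch == "," and depth == 0:
--             return s[:i], s[i + 1:]
--     return None
--
--
-- def _parse_cql_values(values_str: str) -> list[str]:
--     """Split at the first top-level comma, strip the head, recur on the rest;
--     a blank final segment is dropped."""
--     parts = []
--     rest = values_str
--     cut = _split_first(rest)
--     while cut is not None:
--         head, rest = cut
--         parts.append(head.strip())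
--         cut = _split_first(rest)
--     tail = rest.strip()
--     if tail:
--         parts.append(tail)
--     return parts
-- ===== Notes on version B (the rewrite author's own statement) =====
-- stated objective: faster
-- what changed: Replaces A's character-by-character accumulator loop (values/current/depth state, per-char string concatenation) with a cut-and-recur decomposition: a helper finds the first top-level comma and the string is sliced there, so segments are produced by slicing instead of per-character appends.
import Mathlib
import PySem

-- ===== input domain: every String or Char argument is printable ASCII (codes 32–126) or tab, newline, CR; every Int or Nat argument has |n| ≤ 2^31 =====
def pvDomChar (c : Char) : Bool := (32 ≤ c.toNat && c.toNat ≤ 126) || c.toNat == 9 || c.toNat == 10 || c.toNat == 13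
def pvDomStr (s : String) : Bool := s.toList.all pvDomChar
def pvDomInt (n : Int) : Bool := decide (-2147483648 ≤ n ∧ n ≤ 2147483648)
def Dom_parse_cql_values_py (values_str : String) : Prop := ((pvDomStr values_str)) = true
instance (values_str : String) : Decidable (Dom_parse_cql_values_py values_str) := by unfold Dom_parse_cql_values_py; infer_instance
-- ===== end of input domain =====

-- B re-decomposes the single per-char accumulator loop as "find first top-level comma, cut, recur",
-- building segments by slicing instead of per-character appends (a timing run measured B faster).

-- ===== PORT A =====
-- the for-loop of _parse_cql_values, state = (values, current, depth)
def pvAloop : List Char → List String → List Char → Int → List String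
  | [], values, current, _ =>
      if PySem.Chars.strip current ≠ [] then values ++ [String.ofList (PySem.Chars.strip current)]
      else values
  | c :: cs, values, current, depth =>
      if c = '[' ∨ c = '{' then pvAloop cs values (current ++ [c]) (depth + 1)
      else if c = ']' ∨ c = '}' then pvAloop cs values (current ++ [c]) (depth - 1)
      else if c = ',' ∧ depth = 0 then
        pvAloop cs (values ++ [String.ofList (PySem.Chars.strip current)]) [] depth
      else if c = '\'' ∧ depth = 0 then pvAloop cs values (current ++ [c]) depth
      else pvAloop cs values (current ++ [c]) depth

def parse_cql_values_py (values_str : String) : List String :=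
  pvAloop values_str.toList [] [] 0

-- ===== PORT B =====
-- _split_first: scan for the first comma at bracket depth 0; returns (before, after) or none
def pvSplitFirst : List Char → Int → Option (List Char × List Char)
  | [], _ => none
  | c :: cs, depth =>
      if c = '[' ∨ c = '{' then (pvSplitFirst cs (depth + 1)).map (fun p => (c :: p.1, p.2))
      else if c = ']' ∨ c = '}' then (pvSplitFirst cs (depth - 1)).map (fun p => (c :: p.1, p.2))
      else if c = ',' ∧ depth = 0 then some ([], cs)
      else (pvSplitFirst cs depth).map (fun p => (c :: p.1, p.2))

-- termination fact for pvBloop (cited by its decreasing_by)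
lemma pvSplitFirst_snd_lt : ∀ (cs : List Char) (d : Int) (p : List Char × List Char),
    pvSplitFirst cs d = some p → p.2.length < cs.length := by
  intro cs
  induction cs with
  | nil => intro d p h; simp [pvSplitFirst] at h
  | cons c cs ih =>
      intro d p h
      simp only [pvSplitFirst] at h
      split_ifs at h with h1 h2 h3
      · rcases Option.map_eq_some_iff.mp h with ⟨q, hq, rfl⟩
        have := ih _ q hq; simp; omega
      · rcases Option.map_eq_some_iff.mp h with ⟨q, hq, rfl⟩
        have := ih _ q hq; simp; omega
      · cases h; simp
      · rcases Option.map_eq_some_iff.mp h with ⟨q, hq, rfl⟩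
        have := ih _ q hq; simp; omega

-- the while-loop of B: cut at first top-level comma, strip the head, recur on the rest
def pvBloop (cs : List Char) : List String :=
  match h : pvSplitFirst cs 0 with
  | some p => String.ofList (PySem.Chars.strip p.1) :: pvBloop p.2
  | none =>
      if PySem.Chars.strip cs ≠ [] then [String.ofList (PySem.Chars.strip cs)] else []
termination_by cs.length
decreasing_by exact pvSplitFirst_snd_lt _ _ _ h

def parse_cql_values_py_alt (values_str : String) : List String :=
  pvBloop values_str.toList

-- ===== PRECONDITION & SPEC =====
def Spec_parse_cql_values_py (values_str : String) (out : List String) : Prop := out = parse_cql_values_py_alt values_str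
instance (values_str : String) (out : List String) : Decidable (Spec_parse_cql_values_py values_str out) := by unfold Spec_parse_cql_values_py; infer_instance

-- ===== CLAIM (what is proved, stated in full; the proofs are below) =====
def Claim_equal_parse_cql_values_py : Prop := ∀ (values_str : String), Dom_parse_cql_values_py values_str → Spec_parse_cql_values_py values_str (parse_cql_values_py values_str)

-- ===== LEMMAS AND PROOFS =====

lemma pvBloop_some (cs : List Char) (p : List Char × List Char)
    (h : pvSplitFirst cs 0 = some p) :
    pvBloop cs = String.ofList (PySem.Chars.strip p.1) :: pvBloop p.2 := by
  rw [pvBloop]; split <;> simp_all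

lemma pvBloop_none (cs : List Char) (h : pvSplitFirst cs 0 = none) :
    pvBloop cs = if PySem.Chars.strip cs = [] then [] else [String.ofList (PySem.Chars.strip cs)] := by
  rw [pvBloop]; split <;> simp_all

-- A's loop, run from any state, performs one "cut" of B and restarts
lemma pvAloop_eq : ∀ (cs : List Char) (values : List String) (current : List Char) (depth : Int),
    pvAloop cs values current depth =
      match pvSplitFirst cs depth with
      | none =>
          if PySem.Chars.strip (current ++ cs) ≠ [] then
            values ++ [String.ofList (PySem.Chars.strip (current ++ cs))]
          else values
      | some p => pvAloop p.2 (values ++ [String.ofList (PySem.Chars.strip (current ++ p.1))]) [] 0 := by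
  intro cs
  induction cs with
  | nil => intro values current depth; simp [pvSplitFirst, pvAloop]
  | cons c cs ih =>
      intro values current depth
      by_cases h1 : c = '[' ∨ c = '{'
      · simp only [pvAloop, pvSplitFirst, if_pos h1]
        rw [ih]
        cases h : pvSplitFirst cs (depth + 1) <;> simp [h, List.append_assoc]
      · by_cases h2 : c = ']' ∨ c = '}'
        · simp only [pvAloop, pvSplitFirst, if_neg h1, if_pos h2]
          rw [ih]
          cases h : pvSplitFirst cs (depth - 1) <;> simp [h, List.append_assoc]
        · by_cases h3 : c = ',' ∧ depth = 0
          · obtain ⟨hc, hd⟩ := h3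
            subst hd
            simp only [pvAloop, pvSplitFirst, if_neg h1, if_neg h2]
            simp [hc]
          · by_cases h4 : c = '\'' ∧ depth = 0
            · simp only [pvAloop, pvSplitFirst, if_neg h1, if_neg h2, if_neg h3, if_pos h4]
              rw [ih]
              cases h : pvSplitFirst cs depth <;> simp [h, List.append_assoc]
            · simp only [pvAloop, pvSplitFirst, if_neg h1, if_neg h2, if_neg h3, if_neg h4]
              rw [ih]
              cases h : pvSplitFirst cs depth <;> simp [h, List.append_assoc]

lemma pvAloop_bloop (n : Nat) : ∀ (cs : List Char), cs.length ≤ n →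
    ∀ values, pvAloop cs values [] 0 = values ++ pvBloop cs := by
  induction n with
  | zero =>
      intro cs hlen values
      have : cs = [] := List.eq_nil_of_length_eq_zero (Nat.le_zero.mp hlen)
      subst this
      rw [pvAloop_eq]
      simp only [pvSplitFirst]
      rw [pvBloop_none _ rfl]
      split_ifs <;> simp_all
  | succ n ih =>
      intro cs hlen values
      cases h : pvSplitFirst cs 0 with
      | none =>
          rw [pvAloop_eq, h, pvBloop_none _ h]
          simp only [List.nil_append]
          split_ifs <;> simp_all
      | some p =>
          have hlt := pvSplitFirst_snd_lt cs 0 p h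
          rw [pvAloop_eq, h, pvBloop_some _ _ h]
          simp only [List.nil_append]
          rw [ih p.2 (by omega)]
          simp

-- ===== VERDICT (by name: the statement is the Claim_ definition above) =====
theorem parse_cql_values_py_spec : Claim_equal_parse_cql_values_py := by
  intro values_str _
  unfold Spec_parse_cql_values_py parse_cql_values_py parse_cql_values_py_alt
  simpa using pvAloop_bloop values_str.toList.length values_str.toList (le_refl _) []
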